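-- pv_equiv track=rewrite | github.com/HasanBradfordUni/myPublicFiles | Portfolio/Python Apps/Football chess/Football_chess V12.py | RW_moves
-- ===== SOURCE A (Python) =====
-- def RW_moves(moveFromX, moveFromY, moveToX, moveToY, size, player1Turn, player2Turn):
--     possibleMoves = []
--
--     moveDif = ((moveToX - moveFromX),(moveToY - moveFromY))
--
--     if player2Turn:
--         possibleMoves.append((1,1))
--         possibleMoves.append((1,-1))
--     elif player1Turn:
--         possibleMoves.append((-1,1))
--         possibleMoves.append((-1,-1))
--
--     for x in range(size):
--         for y in range(size):
--             if x == y: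
--                 if player2Turn:
--                     possibleMoves.append((-x,-y))
--                     possibleMoves.append((-x,y))
--                 elif player1Turn:
--                     possibleMoves.append((x,-y))
--                     possibleMoves.append((x,y))
--
--     if moveDif in possibleMoves:
--         return True
--     else:
--         return False
-- ===== SOURCE B (Python) =====
-- def RW_moves(moveFromX, moveFromY, moveToX, moveToY, size, player1Turn, player2Turn):
--     dx = moveToX - moveFromX
--     dy = moveToY - moveFromY
--     if abs(dx) != abs(dy):
--         return False
--     if player2Turn:
--         return dx == 1 or (-size < dx <= 0)
--     if player1Turn:
--         return dx == -1 or (0 <= dx < size)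
--     return False
-- ===== Notes on version B (the rewrite author's own statement) =====
-- stated objective: faster
-- what changed: Replaced the O(size^2) double loop that enumerates all diagonal offsets into a list with a direct O(1) arithmetic test on (dx,dy): |dx|=|dy| together with a range condition on dx depending on whose turn it is.
import Mathlib
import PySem

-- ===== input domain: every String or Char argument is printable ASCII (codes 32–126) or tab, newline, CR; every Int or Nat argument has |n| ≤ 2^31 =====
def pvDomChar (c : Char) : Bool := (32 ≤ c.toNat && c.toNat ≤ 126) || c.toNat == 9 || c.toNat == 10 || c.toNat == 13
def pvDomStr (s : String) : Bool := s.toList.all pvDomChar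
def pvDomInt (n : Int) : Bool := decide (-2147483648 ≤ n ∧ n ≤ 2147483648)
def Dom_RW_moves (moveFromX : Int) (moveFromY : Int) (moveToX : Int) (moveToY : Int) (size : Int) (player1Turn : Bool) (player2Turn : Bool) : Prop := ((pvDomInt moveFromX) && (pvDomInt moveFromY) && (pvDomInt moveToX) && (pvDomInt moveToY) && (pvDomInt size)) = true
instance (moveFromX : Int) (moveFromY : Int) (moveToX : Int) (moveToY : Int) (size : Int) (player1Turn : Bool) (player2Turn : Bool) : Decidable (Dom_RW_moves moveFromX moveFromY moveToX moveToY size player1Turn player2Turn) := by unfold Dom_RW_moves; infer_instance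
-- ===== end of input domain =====

-- B replaces A's O(size^2) double loop (which enumerates every diagonal offset into a
-- list and tests membership) by a direct O(1) arithmetic check on (dx,dy).

-- ===== PORT A =====
-- literal transliteration of A: build the possibleMoves list, then a membership test
def RW_moves (moveFromX : Int) (moveFromY : Int) (moveToX : Int) (moveToY : Int) (size : Int) (player1Turn : Bool) (player2Turn : Bool) : Bool :=
  let moveDif : Int × Int := (moveToX - moveFromX, moveToY - moveFromY)
  let possibleMoves : List (Int × Int) :=
    if player2Turn then [(1, 1), (1, -1)]
    else if player1Turn then [(-1, 1), (-1, -1)]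
    else []
  let possibleMoves :=
    (PySem.List.pyRange 0 size 1).foldl (fun acc x =>
      (PySem.List.pyRange 0 size 1).foldl (fun acc2 y =>
        if x == y then
          if player2Turn then acc2 ++ [(-x, -y), (-x, y)]
          else if player1Turn then acc2 ++ [(x, -y), (x, y)]
          else acc2
        else acc2) acc) possibleMoves
  decide (moveDif ∈ possibleMoves)

-- ===== PORT B =====
-- literal transliteration of Source B: early return on |dx| ≠ |dy|, then a range test on dx
def RW_moves_alt (moveFromX : Int) (moveFromY : Int) (moveToX : Int) (moveToY : Int) (size : Int) (player1Turn : Bool) (player2Turn : Bool) : Bool :=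
  let dx := moveToX - moveFromX
  let dy := moveToY - moveFromY
  if |dx| ≠ |dy| then false
  else if player2Turn then dx == 1 || (decide (-size < dx) && decide (dx ≤ 0))
  else if player1Turn then dx == -1 || (decide (0 ≤ dx) && decide (dx < size))
  else false

-- ===== PRECONDITION & SPEC =====
def Spec_RW_moves (moveFromX : Int) (moveFromY : Int) (moveToX : Int) (moveToY : Int) (size : Int) (player1Turn : Bool) (player2Turn : Bool) (out : Bool) : Prop := out = RW_moves_alt moveFromX moveFromY moveToX moveToY size player1Turn player2Turn
instance (moveFromX : Int) (moveFromY : Int) (moveToX : Int) (moveToY : Int) (size : Int) (player1Turn : Bool) (player2Turn : Bool) (out : Bool) : Decidable (Spec_RW_moves moveFromX moveFromY moveToX moveToY size player1Turn player2Turn out) := by unfold Spec_RW_moves; infer_instance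

-- ===== CLAIM (what is proved, stated in full; the proofs are below) =====
def Claim_equal_RW_moves : Prop := ∀ (moveFromX : Int) (moveFromY : Int) (moveToX : Int) (moveToY : Int) (size : Int) (player1Turn : Bool) (player2Turn : Bool), Dom_RW_moves moveFromX moveFromY moveToX moveToY size player1Turn player2Turn → Spec_RW_moves moveFromX moveFromY moveToX moveToY size player1Turn player2Turn (RW_moves moveFromX moveFromY moveToX moveToY size player1Turn player2Turn)

-- ===== LEMMAS AND PROOFS =====

-- a fold that conditionally extends the accumulator is the accumulator ++ a conditional flatMap
theorem foldl_if_append_eq_flatMap {α β : Type} (p : α → Bool) (g : α → List β)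
    (l : List α) (acc : List β) :
    l.foldl (fun a x => if p x then a ++ g x else a) acc
      = acc ++ l.flatMap (fun x => if p x then g x else []) := by
  have h : (fun (a : List β) (x : α) => if p x then a ++ g x else a)
      = fun a x => a ++ (if p x then g x else []) := by
    funext a x; by_cases hp : p x <;> simp [hp]
  rw [h, PySem.List.foldl_append_eq_flatMap]

-- membership in A's possibleMoves list, characterised arithmetically
theorem mem_pm_iff (size : Int) (p : Int → Bool) (g : Int → Int → List (Int × Int))
    (init : List (Int × Int)) (d : Int × Int) :
    (d ∈ (PySem.List.pyRange 0 size 1).foldl (fun acc x =>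
        (PySem.List.pyRange 0 size 1).foldl (fun acc2 y =>
          if x == y then
            if p x then acc2 ++ g x y else acc2
          else acc2) acc) init)
      ↔ d ∈ init ∨ ∃ x, 0 ≤ x ∧ x < size ∧ p x ∧ d ∈ g x x := by
  have hinner : ∀ (x : Int) (acc : List (Int × Int)),
      (PySem.List.pyRange 0 size 1).foldl (fun acc2 y =>
          if x == y then (if p x then acc2 ++ g x y else acc2) else acc2) acc
        = acc ++ (PySem.List.pyRange 0 size 1).flatMap
            (fun y => if (x == y && p x) then g x y else []) := by
    intro x acc
    rw [← foldl_if_append_eq_flatMap (fun y => x == y && p x) (g x)]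
    congr 1
    funext a y
    by_cases hxy : x = y <;> by_cases hp : p x <;> simp [hxy, hp]
  have houter : (fun (acc : List (Int × Int)) (x : Int) =>
      (PySem.List.pyRange 0 size 1).foldl (fun acc2 y =>
          if x == y then (if p x then acc2 ++ g x y else acc2) else acc2) acc)
      = fun acc x => acc ++ (PySem.List.pyRange 0 size 1).flatMap
            (fun y => if (x == y && p x) then g x y else []) := by
    funext acc x; exact hinner x acc
  rw [houter, PySem.List.foldl_append_eq_flatMap]
  simp only [List.mem_append, List.mem_flatMap, PySem.List.mem_pyRange_one]
  constructor
  · rintro (h | ⟨x, ⟨hx0, hxs⟩, y, ⟨hy0, hys⟩, hd⟩)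
    · exact Or.inl h
    · right
      by_cases hxy : x = y
      · subst hxy
        by_cases hp : p x
        · simp [hp] at hd; exact ⟨x, hx0, hxs, hp, hd⟩
        · simp [hp] at hd
      · simp [hxy] at hd
  · rintro (h | ⟨x, hx0, hxs, hp, hd⟩)
    · exact Or.inl h
    · exact Or.inr ⟨x, ⟨hx0, hxs⟩, x, ⟨hx0, hxs⟩, by simp [hp, hd]⟩

-- ===== VERDICT (by name: the statement is the Claim_ definition above) =====
theorem RW_moves_spec : Claim_equal_RW_moves := by
  unfold Claim_equal_RW_moves Spec_RW_moves
  intro mfX mfY mtX mtY size p1 p2 _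
  unfold RW_moves RW_moves_alt
  set dx := mtX - mfX with hdx
  set dy := mtY - mfY with hdy
  cases p2 with
  | true =>
    have h := mem_pm_iff size (fun _ => true)
      (fun x y => [(-x, -y), (-x, y)]) [(1, 1), (1, -1)] (dx, dy)
    rw [Bool.eq_iff_iff]
    simp only [if_true, decide_eq_true_eq]
    constructor
    · intro hm
      rcases (h.mp (by simpa using hm)) with hinit | ⟨x, hx0, hxs, _, hd⟩
      · simp [Prod.ext_iff] at hinit
        rcases hinit with ⟨h1, h2⟩ | ⟨h1, h2⟩ <;> norm_num [h1, h2]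
      · simp [Prod.ext_iff] at hd
        rcases hd with ⟨h1, h2⟩ | ⟨h1, h2⟩ <;>
          · have hn : dx.natAbs = dy.natAbs := by omega
            have habs : |dx| = |dy| := by
              rw [Int.abs_eq_natAbs, Int.abs_eq_natAbs, hn]
            simp [habs]; omega
    · intro hm
      split_ifs at hm with habs
      rw [not_ne_iff] at habs
      have hn : dx.natAbs = dy.natAbs := by
        rw [Int.abs_eq_natAbs, Int.abs_eq_natAbs] at habs; exact_mod_cast habs
      apply h.mpr
      simp only [Bool.or_eq_true, beq_iff_eq, Bool.and_eq_true, decide_eq_true_eq] at hm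
      rcases hm with h1 | ⟨h1, h2⟩
      · left
        have : dy = 1 ∨ dy = -1 := by omega
        rcases this with h' | h' <;> simp [h1, h']
      · right
        refine ⟨-dx, by omega, by omega, rfl, ?_⟩
        have : dy = dx ∨ dy = -dx := by omega
        rcases this with h' | h' <;> simp [Prod.ext_iff] <;> omega
  | false =>
    cases p1 with
    | true =>
      have h := mem_pm_iff size (fun _ => true)
        (fun x y => [(x, -y), (x, y)]) [(-1, 1), (-1, -1)] (dx, dy)
      rw [Bool.eq_iff_iff]
      simp only [Bool.false_eq_true, if_true, if_false, decide_eq_true_eq]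
      constructor
      · intro hm
        rcases (h.mp (by simpa using hm)) with hinit | ⟨x, hx0, hxs, _, hd⟩
        · simp [Prod.ext_iff] at hinit
          rcases hinit with ⟨h1, h2⟩ | ⟨h1, h2⟩ <;> norm_num [h1, h2]
        · simp [Prod.ext_iff] at hd
          rcases hd with ⟨h1, h2⟩ | ⟨h1, h2⟩ <;>
            · have hn : dx.natAbs = dy.natAbs := by omega
              have habs : |dx| = |dy| := by
                rw [Int.abs_eq_natAbs, Int.abs_eq_natAbs, hn]
              simp [habs]; omega
      · intro hm
        split_ifs at hm with habs
        rw [not_ne_iff] at habs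
        have hn : dx.natAbs = dy.natAbs := by
          rw [Int.abs_eq_natAbs, Int.abs_eq_natAbs] at habs; exact_mod_cast habs
        apply h.mpr
        simp only [Bool.or_eq_true, beq_iff_eq, Bool.and_eq_true, decide_eq_true_eq] at hm
        rcases hm with h1 | ⟨h1, h2⟩
        · left
          have : dy = 1 ∨ dy = -1 := by omega
          rcases this with h' | h' <;> simp [h1, h']
        · right
          refine ⟨dx, by omega, by omega, rfl, ?_⟩
          have : dy = dx ∨ dy = -dx := by omega
          rcases this with h' | h' <;> simp [Prod.ext_iff] <;> omega
    | false =>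
      have h := mem_pm_iff size (fun _ => false)
        (fun _ _ => ([] : List (Int × Int))) ([] : List (Int × Int)) (dx, dy)
      rw [Bool.eq_iff_iff]
      simp only [Bool.false_eq_true, if_false, decide_eq_true_eq]
      constructor
      · intro hm
        rcases (h.mp (by simpa using hm)) with hinit | ⟨x, _, _, hp, _⟩
        · simp at hinit
        · simp at hp
      · intro hm
        simp at hm
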